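-- pv_equiv track=rewrite | github.com/97549783/genealogy | tabs/profiles/entropy.py | build_hierarchy_from_codes
-- ===== SOURCE A (Python) =====
-- from typing import Dict, List, Optional
--
-- def build_hierarchy_from_codes(codes: List[str]) -> Dict[str, List[str]]:
--     """
--     Строит иерархию классификатора из списка кодов.
--
--     Для каждого кода определяет список его предков на основе структуры кода.
--     Например, для "1.1.2.3" предками будут ["1", "1.1", "1.1.2"]
--
--     Параметры:
--         codes: Список кодов классификатора
--
--     Возвращает:
--         Словарь {код: [список предков]}
--     """
--     hierarchy = {}
--
--     for code in codes:
--         parents = []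
--         parts = code.split(".")
--
--         # Строим список предков
--         for i in range(1, len(parts)):
--             parent = ".".join(parts[:i])
--             parents.append(parent)
--
--         hierarchy[code] = parents
--
--     return hierarchy
-- ===== SOURCE B (Python) =====
-- def build_hierarchy_from_codes(codes):
--     def ancestors(code):
--         if '.' not in code:
--             return []
--         parent = code.rsplit('.', 1)[0]
--         return ancestors(parent) + [parent]
--     return {code: ancestors(code) for code in codes}
-- ===== Notes on version B (the rewrite author's own statement) =====
-- stated objective: alternative
-- what changed: Replaces the inner index loop that re-joins parts[:i] for every i with a recursion over the prefix chain: a helper strips the last dotted segment via rsplit('.',1)[0] and recurses on the parent, so no split-into-parts and repeated re-join of prefixes happens at all.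
import Mathlib
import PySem

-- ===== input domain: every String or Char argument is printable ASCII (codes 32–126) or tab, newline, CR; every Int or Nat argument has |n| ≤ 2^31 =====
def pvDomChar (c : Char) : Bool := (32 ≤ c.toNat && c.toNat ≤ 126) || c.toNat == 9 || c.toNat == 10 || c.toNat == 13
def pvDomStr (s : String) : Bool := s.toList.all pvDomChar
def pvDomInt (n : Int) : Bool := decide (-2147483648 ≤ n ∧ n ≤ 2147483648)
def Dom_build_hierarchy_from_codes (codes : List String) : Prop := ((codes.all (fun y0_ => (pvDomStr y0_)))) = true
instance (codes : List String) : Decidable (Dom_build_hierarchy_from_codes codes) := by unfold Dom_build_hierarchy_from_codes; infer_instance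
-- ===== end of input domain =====

-- B replaces A's inner index loop (".".join(parts[:i]) for each i) by a recursion that strips the
-- last dotted segment (rsplit('.', 1)[0]) and recurses on the parent: a different decomposition of the same task.

-- ===== PORT A =====
-- A: parts = code.split("."); for i in range(1, len(parts)): parents.append(".".join(parts[:i]));
--    hierarchy[code] = parents   (dict in insertion order)
def build_hierarchy_from_codes (codes : List String) : List (String × List String) :=
  (codes.foldl
    (fun hierarchy code =>
      let parts : List String := (PySem.Chars.splitOn code.toList ".".toList).map String.ofList
      let parents : List String :=
        (PySem.List.pyRange 1 (parts.length : Int)).foldl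
          (fun parents i =>
            parents ++ [PySem.Str.join "." (PySem.List.slice parts none (some i))]) []
      hierarchy.insert code parents)
    (PySem.Dict.empty : PySem.Dict String (List String))).items

-- ===== PORT B =====
-- hand port of code.rsplit('.', 1)[0] (everything before the LAST '.'; exact when '.' occurs in cs):
-- reverse, drop the trailing segment and the dot, reverse back
def pvParent (cs : List Char) : List Char :=
  ((cs.reverse.dropWhile (fun c => c ≠ '.')).drop 1).reverse

-- termination measure for pvAncestors: the parent is strictly shorter
theorem pvParent_length_lt (cs : List Char) (h : cs ≠ []) : (pvParent cs).length < cs.length := by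
  have h1 : (cs.reverse.dropWhile (fun c => c ≠ '.')).length ≤ cs.length := by
    calc (cs.reverse.dropWhile (fun c => c ≠ '.')).length
        ≤ cs.reverse.length := List.length_dropWhile_le _ _
      _ = cs.length := List.length_reverse
  have h2 : 0 < cs.length := List.length_pos_iff.mpr h
  simp only [pvParent, List.length_reverse, List.length_drop]
  omega

-- B's helper: ancestors(code) = [] if '.' not in code, else ancestors(parent) + [parent]
def pvAncestors (cs : List Char) : List (List Char) :=
  if PySem.Chars.isIn ".".toList cs then
    pvAncestors (pvParent cs) ++ [pvParent cs]
  else []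
termination_by cs.length
decreasing_by
  exact pvParent_length_lt cs (by
    rename_i h
    rcases (PySem.Chars.isIn_iff_infix _ _).mp h with ⟨a, b, hab⟩
    intro hnil; simp [hnil] at hab)

def build_hierarchy_from_codes_alt (codes : List String) : List (String × List String) :=
  (codes.foldl
    (fun h code => h.insert code ((pvAncestors code.toList).map String.ofList))
    (PySem.Dict.empty : PySem.Dict String (List String))).items

-- ===== PRECONDITION & SPEC =====
def Spec_build_hierarchy_from_codes (codes : List String) (out : List (String × List String)) : Prop := out = build_hierarchy_from_codes_alt codes
instance (codes : List String) (out : List (String × List String)) : Decidable (Spec_build_hierarchy_from_codes codes out) := by unfold Spec_build_hierarchy_from_codes; infer_instance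

-- ===== CLAIM (what is proved, stated in full; the proofs are below) =====
def Claim_equal_build_hierarchy_from_codes : Prop := ∀ (codes : List String), Dom_build_hierarchy_from_codes codes → Spec_build_hierarchy_from_codes codes (build_hierarchy_from_codes codes)

-- ===== LEMMAS AND PROOFS =====

def pvSplit : List Char → List (List Char)
  | [] => [[]]
  | c :: r =>
    if c = '.' then [] :: pvSplit r
    else match pvSplit r with
      | [] => [[c]]
      | h :: t => (c :: h) :: t

theorem pvSplit_ne_nil (cs : List Char) : pvSplit cs ≠ [] := by
  cases cs with
  | nil => simp [pvSplit]
  | cons c r =>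
    simp only [pvSplit]
    split_ifs
    · simp
    · cases pvSplit r <;> simp

theorem splitOn_go_eq (l : List Char) : ∀ (fuel : Nat) (cur : List Char) (acc : List (List Char)),
    l.length ≤ fuel →
    PySem.Chars.splitOn.go ['.'] fuel l cur acc =
      acc.reverse ++ (match pvSplit l with
        | [] => []
        | h :: t => (cur.reverse ++ h) :: t) := by
  induction l with
  | nil =>
    intro fuel cur acc _
    cases fuel <;> simp [PySem.Chars.splitOn.go, pvSplit]
  | cons c r ih =>
    intro fuel cur acc hf
    cases fuel with
    | zero => simp at hf
    | succ f =>
      have hf' : r.length ≤ f := by simpa using hf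
      obtain ⟨h, t, hht⟩ : ∃ h t, pvSplit r = h :: t := by
        cases hx : pvSplit r with
        | nil => exact absurd hx (pvSplit_ne_nil r)
        | cons a b => exact ⟨a, b, rfl⟩
      by_cases hc : c = '.'
      · subst hc
        simp only [PySem.Chars.splitOn.go, List.isPrefixOf, BEq.rfl, Bool.true_and,
          if_true, List.length_cons, List.length_nil,
          List.drop_succ_cons, List.drop_zero]
        rw [ih f [] (cur.reverse :: acc) hf']
        simp [pvSplit, hht]
      · simp only [PySem.Chars.splitOn.go]
        rw [if_neg (by simp [List.isPrefixOf]; exact fun hh => hc hh.symm)]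
        rw [ih f (c :: cur) acc hf']
        simp [pvSplit, hht, hc]

theorem splitOn_eq_pvSplit (cs : List Char) : PySem.Chars.splitOn cs ".".toList = pvSplit cs := by
  rw [show ("." : String).toList = ['.'] from rfl]
  unfold PySem.Chars.splitOn
  rw [splitOn_go_eq cs (cs.length + 1) [] [] (by omega)]
  obtain ⟨h, t, hht⟩ : ∃ h t, pvSplit cs = h :: t := by
    cases hx : pvSplit cs with
    | nil => exact absurd hx (pvSplit_ne_nil cs)
    | cons a b => exact ⟨a, b, rfl⟩
  simp [hht]

theorem pvSplit_no_dot (cs : List Char) (h : '.' ∉ cs) : pvSplit cs = [cs] := by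
  induction cs with
  | nil => rfl
  | cons c r ih =>
    simp only [List.mem_cons, not_or] at h
    rw [pvSplit, if_neg (fun hh => h.1 hh.symm), ih h.2]

theorem pvSplit_append (a b : List Char) : pvSplit (a ++ '.' :: b) = pvSplit a ++ pvSplit b := by
  induction a with
  | nil => simp [pvSplit]
  | cons c r ih =>
    by_cases hc : c = '.'
    · subst hc; simp [pvSplit, ih]
    · obtain ⟨h, t, hht⟩ : ∃ h t, pvSplit r = h :: t := by
        cases hx : pvSplit r with
        | nil => exact absurd hx (pvSplit_ne_nil r)
        | cons x y => exact ⟨x, y, rfl⟩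
      simp only [List.cons_append, pvSplit, if_neg hc, ih, hht, List.cons_append]

theorem join_pvSplit (cs : List Char) : PySem.Chars.join ['.'] (pvSplit cs) = cs := by
  induction cs with
  | nil => simp [pvSplit, PySem.Chars.join_singleton]
  | cons c r ih =>
    obtain ⟨h, t, hht⟩ : ∃ h t, pvSplit r = h :: t := by
      cases hx : pvSplit r with
      | nil => exact absurd hx (pvSplit_ne_nil r)
      | cons x y => exact ⟨x, y, rfl⟩
    by_cases hc : c = '.'
    · subst hc
      rw [pvSplit, if_pos rfl]
      rw [hht] at ih ⊢
      rw [PySem.Chars.join_cons_cons]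
      simp [ih]
    · rw [pvSplit, if_neg hc, hht]
      rw [hht] at ih
      cases t with
      | nil => rw [PySem.Chars.join_singleton] at ih ⊢; simp [ih]
      | cons u v =>
        rw [PySem.Chars.join_cons_cons] at ih ⊢
        simp [ih]

theorem pvParent_decomp (cs : List Char) (h : '.' ∈ cs) :
    cs = pvParent cs ++ '.' :: (cs.reverse.takeWhile (fun c => c ≠ '.')).reverse ∧
    '.' ∉ (cs.reverse.takeWhile (fun c => c ≠ '.')).reverse := by
  have hmem : '.' ∈ cs.reverse := by simpa using h
  have hd : cs.reverse.dropWhile (fun c => c ≠ '.') ≠ [] := by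
    intro hnil
    rw [List.dropWhile_eq_nil_iff] at hnil
    have := hnil '.' hmem
    simp at this
  have hhead : ((cs.reverse.dropWhile (fun c => c ≠ '.')).head hd) = '.' := by
    have := List.head_dropWhile_not (fun c => decide (c ≠ '.')) (l := cs.reverse) (by simpa using hd)
    simpa using this
  have hsplit : cs.reverse.takeWhile (fun c => c ≠ '.') ++ cs.reverse.dropWhile (fun c => c ≠ '.') = cs.reverse :=
    List.takeWhile_append_dropWhile
  have hcons : cs.reverse.dropWhile (fun c => c ≠ '.') =
      '.' :: (cs.reverse.dropWhile (fun c => c ≠ '.')).tail := by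
    conv_lhs => rw [← List.cons_head_tail hd, hhead]
  constructor
  · conv_lhs => rw [← List.reverse_reverse cs, ← hsplit]
    rw [hcons]
    simp [pvParent]
  · intro hx
    have := List.mem_takeWhile_imp (by simpa using hx)
    simp at this

def pvPA (parts : List (List Char)) : List (List Char) :=
  (PySem.List.pyRange 1 (parts.length : Int)).map
    (fun i => PySem.Chars.join ['.'] (parts.take i.toNat))

theorem pvPA_snoc (q : List (List Char)) (x : List Char) (hq : q ≠ []) :
    pvPA (q ++ [x]) = pvPA q ++ [PySem.Chars.join ['.'] q] := by
  have hn : 1 ≤ (q.length : Int) := by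
    have := List.length_pos_iff.mpr hq; omega
  unfold pvPA
  rw [List.length_append, List.length_cons, List.length_nil]
  rw [show ((q.length + (0+1) : Nat) : Int) = (q.length : Int) + 1 by push_cast; ring]
  rw [PySem.List.pyRange_one_succ_right hn]
  rw [List.map_append]
  congr 1
  · apply List.map_congr_left
    intro i hi
    rw [PySem.List.mem_pyRange_one] at hi
    rw [List.take_append_of_le_length (by omega)]
  · simp [List.take_left']

theorem pvAncestors_eq_pvPA (cs : List Char) : pvAncestors cs = pvPA (pvSplit cs) := by
  by_cases hin : PySem.Chars.isIn ".".toList cs = true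
  · have hmem : '.' ∈ cs := by
      rcases (PySem.Chars.isIn_iff_infix _ _).mp hin with ⟨a, b, hab⟩
      rw [← hab]; simp [show ("." : String).toList = ['.'] from rfl]
    obtain ⟨hcs, hnd⟩ := pvParent_decomp cs hmem
    rw [pvAncestors, if_pos hin]
    rw [pvAncestors_eq_pvPA (pvParent cs)]
    conv_rhs => rw [hcs]
    rw [pvSplit_append, pvSplit_no_dot _ hnd, pvPA_snoc _ _ (pvSplit_ne_nil _), join_pvSplit]
  · have hmem : '.' ∉ cs := by
      intro hx
      rcases List.append_of_mem hx with ⟨a, b, hab⟩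
      exact hin ((PySem.Chars.isIn_iff_infix _ _).mpr ⟨a, b, by simp [hab, show ("." : String).toList = ['.'] from rfl]⟩)
    rw [pvAncestors, if_neg hin, pvSplit_no_dot _ hmem]
    simp [pvPA, PySem.List.pyRange]
termination_by cs.length
decreasing_by
  exact pvParent_length_lt cs (by rintro rfl; simp at hmem)

theorem join_ofList (q : List (List Char)) :
    PySem.Str.join "." (q.map String.ofList) = String.ofList (PySem.Chars.join ['.'] q) := by
  rw [← String.toList_inj, PySem.Str.toList_join]
  simp [show ("." : String).toList = ['.'] from rfl, List.map_map, Function.comp_def]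

theorem percode_eq (code : String) :
    (PySem.List.pyRange 1 (((PySem.Chars.splitOn code.toList ".".toList).map String.ofList).length : Int)).foldl
      (fun parents i =>
        parents ++ [PySem.Str.join "." (PySem.List.slice ((PySem.Chars.splitOn code.toList ".".toList).map String.ofList) none (some i))]) []
      = (pvAncestors code.toList).map String.ofList := by
  rw [PySem.List.foldl_append_singleton_eq_map]
  rw [pvAncestors_eq_pvPA, splitOn_eq_pvSplit]
  unfold pvPA
  rw [List.map_map, List.length_map]
  apply List.map_congr_left
  intro i hi
  rw [PySem.List.mem_pyRange_one] at hi
  simp only [Function.comp_def]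
  rw [PySem.List.slice_to _ (by omega), ← List.map_take, join_ofList]

-- ===== VERDICT (by name: the statement is the Claim_ definition above) =====
theorem build_hierarchy_from_codes_spec : Claim_equal_build_hierarchy_from_codes := by
  intro codes hdom
  clear hdom
  unfold Spec_build_hierarchy_from_codes build_hierarchy_from_codes build_hierarchy_from_codes_alt
  congr 1
  generalize (PySem.Dict.empty : PySem.Dict String (List String)) = d
  induction codes generalizing d with
  | nil => rfl
  | cons c cs ih =>
    simp only [List.foldl_cons]
    rw [percode_eq c]
    apply ih
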